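-- pv_equiv track=rewrite | github.com/rudolfKischer/comp321-assignment-solutions | assignment5/shopaholic_rudi.py | get_max_discount
-- ===== SOURCE A (Python) =====
-- def get_max_discount(items):
--     items.sort()
--     items.reverse()
--     discount_length = 3
--     items = items[:(len(items) - (len(items) % discount_length))]
--     items_grouped = [items[i:i+discount_length] for i in range(0, len(items), discount_length)]
--     discount = sum([group[-1] for group in items_grouped])
--     return discount
-- ===== SOURCE B (Python) =====
-- def get_max_discount(items):
--     items.sort(reverse=True)
--     return sum(items[2::3])
-- ===== Notes on version B (the rewrite author's own statement) =====
-- stated objective: simpler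
-- what changed: Replaces truncation + chunking into triples + taking each chunk's last element with a single strided slice items[2::3] over the in-place descending sort, whose sum is returned directly.
import Mathlib
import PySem

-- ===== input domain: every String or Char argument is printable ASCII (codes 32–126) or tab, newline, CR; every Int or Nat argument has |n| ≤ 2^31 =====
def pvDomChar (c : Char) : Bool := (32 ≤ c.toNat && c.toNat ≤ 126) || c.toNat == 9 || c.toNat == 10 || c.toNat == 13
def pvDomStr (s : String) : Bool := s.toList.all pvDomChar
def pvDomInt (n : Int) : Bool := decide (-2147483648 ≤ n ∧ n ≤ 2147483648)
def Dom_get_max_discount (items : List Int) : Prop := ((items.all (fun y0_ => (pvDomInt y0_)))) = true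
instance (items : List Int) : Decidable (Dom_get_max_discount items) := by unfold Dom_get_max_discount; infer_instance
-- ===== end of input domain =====

-- ===== PORT A =====
-- B replaces A's truncate+chunk-into-triples+last-of-each-chunk with a single strided
-- slice items[2::3] over the descending sort (objective: simpler). Both A and B sort the
-- caller's list in place to descending order; the theorems are about the return value.
def get_max_discount (items : List Int) : Int :=
  let items1 := PySem.List.sorted items (fun x => x)
  let items2 := items1.reverse
  let dl : Int := 3
  let items3 := PySem.List.slice items2 none
      (some ((items2.length : Int) - PySem.Int.mod (items2.length : Int) dl))
  let groups := (PySem.List.pyRange 0 (items3.length : Int) dl).map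
      (fun i => PySem.List.slice items3 (some i) (some (i + dl)))
  -- group[-1]; every group is a nonempty triple here, so the none branch is unreachable
  (groups.map (fun g => (PySem.List.pyGet? g (-1)).getD 0)).sum

-- ===== PORT B =====
def get_max_discount_alt (items : List Int) : Int :=
  let s := PySem.List.sorted items (fun x => x) true
  ((PySem.List.slice? s (some 2) none 3).getD []).sum

-- ===== PRECONDITION & SPEC =====
def Spec_get_max_discount (items : List Int) (out : Int) : Prop := out = get_max_discount_alt items
instance (items : List Int) (out : Int) : Decidable (Spec_get_max_discount items out) := by unfold Spec_get_max_discount; infer_instance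

-- ===== CLAIM (what is proved, stated in full; the proofs are below) =====
def Claim_equal_get_max_discount : Prop := ∀ (items : List Int), Dom_get_max_discount items → Spec_get_max_discount items (get_max_discount items)

-- ===== LEMMAS AND PROOFS =====

-- canonical form both cores are reduced to: sum of the elements at indices 3k+2, k < len/3
def pvStride (t : List Int) : Int :=
  ((List.range (t.length / 3)).map (fun k => t.getD (3 * k + 2) 0)).sum

-- A's truncated list items[:len-len%3]
def pvT2 (t : List Int) : List Int :=
  PySem.List.slice t none (some ((t.length : Int) - PySem.Int.mod (t.length : Int) 3))

-- sort ascending then reverse = sort descending (Int elements, so stability is moot)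
theorem pv_rev_sorted (xs : List Int) :
    (PySem.List.sorted xs (fun x => x)).reverse = PySem.List.sorted xs (fun x => x) true := by
  refine List.Perm.eq_of_pairwise (le := fun a b : Int => b ≤ a) ?_ ?_ ?_
    (((List.reverse_perm _).trans (PySem.List.sorted_perm xs (fun x => x) false)).trans
      (PySem.List.sorted_perm xs (fun x => x) true).symm)
  · intro a b _ _ h1 h2; omega
  · exact (List.pairwise_reverse).mpr (by
      simpa using PySem.List.sorted_pairwise xs (fun x => x))
  · simpa using PySem.List.sorted_pairwise_rev xs (fun x => x)

theorem filterMap_some_range {α : Type} (m : Nat) (f : Nat → Option α) (g : Nat → α)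
    (h : ∀ k < m, f k = some (g k)) :
    (List.range m).filterMap f = (List.range m).map g := by
  induction m with
  | zero => simp
  | succ n ih =>
    rw [List.range_succ, List.filterMap_append, List.map_append,
      ih (fun k hk => h k (by omega))]
    simp [h n (by omega)]

theorem pv_B_core (t : List Int) :
    ((PySem.List.slice? t (some 2) none 3).getD []).sum = pvStride t := by
  unfold PySem.List.slice? PySem.List.sliceIndices pvStride
  simp only [if_neg (by norm_num : ¬ (3:Int) = 0)]
  by_cases h : t.length ≤ 2
  · have h1 : min (2:Int) (t.length:Int) = (t.length:Int) := by omega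
    have h2 : t.length / 3 = 0 := by omega
    simp [h1, h2]
  · have h1 : min (2:Int) (t.length:Int) = 2 := by omega
    norm_num [h1]
    rw [if_pos (show 2 < t.length by omega)]
    have hc : (((t.length:Int) - 2 + 3 - 1) / 3).toNat = t.length / 3 := by omega
    have hsome : ∀ k < t.length / 3,
        t[((2:Int) + 3 * (k:Int)).toNat]? = some (t.getD (3 * k + 2) 0) := by
      intro k hk
      have hlt : 3 * k + 2 < t.length := by omega
      have h2 : ((2:Int) + 3 * (k:Int)).toNat = 3 * k + 2 := by omega
      rw [h2, List.getElem?_eq_getElem hlt, List.getD_eq_getElem t 0 hlt]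
    rw [hc, filterMap_some_range (t.length / 3) _ (fun k => t.getD (3 * k + 2) 0) hsome]
    simp [List.getD_eq_getElem?_getD]

theorem pv_A_core (t : List Int) :
    (((PySem.List.pyRange 0 ((pvT2 t).length : Int) 3).map
        (fun i => PySem.List.slice (pvT2 t) (some i) (some (i + 3)))).map
      (fun g => (PySem.List.pyGet? g (-1)).getD 0)).sum = pvStride t := by
  have hfmod : PySem.Int.mod ((t.length : Int)) 3 = ((t.length % 3 : Nat) : Int) := by
    unfold PySem.Int.mod
    rw [Int.fmod_eq_emod]
    push_cast
    simp
  have hT2 : pvT2 t = t.take (3 * (t.length / 3)) := by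
    unfold pvT2
    rw [hfmod, PySem.List.slice_to t (by omega)]
    congr 1
    omega
  have hlen : ((pvT2 t).length : Int) = ((3 * (t.length / 3) : Nat) : Int) := by
    rw [hT2]
    simp
    omega
  rw [hlen, PySem.List.pyRange_of_pos _ _ (by norm_num : (0:Int) < 3)]
  have hcount : (if (0:Int) < ((3 * (t.length / 3) : Nat) : Int) then
      ((((3 * (t.length / 3) : Nat) : Int) - 0 + 3 - 1) / 3).toNat else 0) = t.length / 3 := by
    split_ifs with hp
    · omega
    · omega
  rw [hcount]
  rw [List.map_map, List.map_map]
  unfold pvStride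
  apply congrArg
  apply List.map_congr_left
  intro k hk
  rw [List.mem_range] at hk
  simp only [Function.comp]
  have hs : PySem.List.slice (pvT2 t) (some (0 + 3 * (k:Int))) (some (0 + 3 * (k:Int) + 3))
      = List.take 3 (List.drop (3 * k) (t.take (3 * (t.length / 3)))) := by
    rw [hT2, PySem.List.slice_toNat _ (by omega) (by omega),
      (by omega : ((0:Int) + 3 * (k:Int)).toNat = 3 * k),
      (by omega : ((0:Int) + 3 * (k:Int) + 3).toNat = 3 * k + 3),
      (by omega : 3 * k + 3 - 3 * k = 3)]
  rw [hs, PySem.List.pyGet?_neg_one, List.getLast?_eq_getElem?]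
  have hglen : (List.take 3 (List.drop (3 * k) (t.take (3 * (t.length / 3))))).length = 3 := by
    simp
    omega
  rw [hglen]
  simp only [List.getElem?_take, List.getElem?_drop]
  rw [if_pos (by omega : 2 < 3), if_pos (by omega : 3 * k + 2 < 3 * (t.length / 3))]
  rw [List.getElem?_eq_getElem (by omega : 3 * k + 2 < t.length),
    List.getD_eq_getElem t 0 (by omega : 3 * k + 2 < t.length)]
  simp

-- ===== VERDICT (by name: the statement is the Claim_ definition above) =====
theorem get_max_discount_spec : Claim_equal_get_max_discount := by
  intro items _
  unfold Spec_get_max_discount get_max_discount get_max_discount_alt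
  simp only [pv_rev_sorted]
  rw [pv_B_core]
  rw [← pvT2]
  exact pv_A_core _
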